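-- pv_equiv track=rewrite | github.com/eseidinger/algos-apps | python_algos/complexity/varianttree.py | get_extended_minterms
-- ===== SOURCE A (Python) =====
-- def get_extended_minterms(
--     minterms: list[int], nof_irreleveant_symobls: int
-- ) -> list[int]:
--     """Return an extended list of minterms where the LSBs have no influence on the result"""
--     minterm_lsbs = list(range(2**nof_irreleveant_symobls))
--     minterms_msbs = {
--         minterm >> nof_irreleveant_symobls << nof_irreleveant_symobls
--         for minterm in minterms
--     }
--     extended_minterms = set()
--     for msb in minterms_msbs:
--         extended_minterms.update([msb + lsb for lsb in minterm_lsbs])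
--     return sorted(list(extended_minterms))
-- ===== SOURCE B (Python) =====
-- def get_extended_minterms(
--     minterms: list[int], nof_irreleveant_symobls: int
-- ) -> list[int]:
--     """Return an extended list of minterms where the LSBs have no influence on the result"""
--     size = 2 ** nof_irreleveant_symobls
--     out = []
--     last = None
--     for m in sorted(minterms):
--         base = m >> nof_irreleveant_symobls << nof_irreleveant_symobls
--         if base != last:
--             out.extend(range(base, base + size))
--             last = base
--     return out
-- ===== Notes on version B (the rewrite author's own statement) =====
-- stated objective: faster
-- what changed: B uses no set and never sorts the expanded list: it sorts the raw minterms once, then makes a single scan that deduplicates equal block bases by comparing with the last emitted base (masking is monotone, so duplicates are adjacent) and appends each new block's contiguous range, which is already in ascending order; A instead materialises all M*2^k extended minterms in a hash set and sorts them.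
import Mathlib
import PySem

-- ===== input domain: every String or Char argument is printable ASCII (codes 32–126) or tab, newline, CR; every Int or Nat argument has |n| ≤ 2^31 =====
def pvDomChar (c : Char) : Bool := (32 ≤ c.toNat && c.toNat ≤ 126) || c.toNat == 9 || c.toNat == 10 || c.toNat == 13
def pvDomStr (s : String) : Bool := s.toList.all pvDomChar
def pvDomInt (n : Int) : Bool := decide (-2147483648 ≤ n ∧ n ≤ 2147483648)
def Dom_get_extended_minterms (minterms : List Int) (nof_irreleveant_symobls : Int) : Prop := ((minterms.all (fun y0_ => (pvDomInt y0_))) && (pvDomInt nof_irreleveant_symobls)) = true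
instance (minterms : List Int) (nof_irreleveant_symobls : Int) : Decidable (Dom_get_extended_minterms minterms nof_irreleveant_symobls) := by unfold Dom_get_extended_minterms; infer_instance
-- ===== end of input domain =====

-- B uses no set and never sorts the expanded list: it sorts the raw minterms once and
-- makes one scan that skips a block whose base equals the last emitted base (masking is
-- monotone, so equal bases are adjacent) and appends each new block's contiguous range
-- (objective: faster — it sorts M elements instead of M*2^k).

-- ===== PORT A =====
def get_extended_minterms (minterms : List Int) (nof_irreleveant_symobls : Int) : List Int :=
  let k := nof_irreleveant_symobls.toNat
  let minterm_lsbs := PySem.List.pyRange 0 ((2 : Int) ^ k) 1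
  let minterms_msbs : PySem.Set Int :=
    PySem.Set.ofList (minterms.map (fun minterm : Int => (minterm >>> k) <<< k))
  let extended_minterms : PySem.Set Int :=
    minterms_msbs.foldl
      (fun s msb => PySem.Set.update s (minterm_lsbs.map (fun lsb => msb + lsb)))
      PySem.Set.empty
  PySem.List.sorted extended_minterms (fun x => x)

-- ===== PORT B =====
def get_extended_minterms_alt (minterms : List Int) (nof_irreleveant_symobls : Int) : List Int :=
  let k := nof_irreleveant_symobls.toNat
  let size : Int := (2 : Int) ^ k
  ((PySem.List.sorted minterms (fun x => x)).foldl
    (fun (st : List Int × Option Int) (m : Int) =>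
      let base := (m >>> k) <<< k
      if st.2 = some base then st
      else (st.1 ++ PySem.List.pyRange base (base + size) 1, some base))
    ([], none)).1

-- ===== PRECONDITION & SPEC =====
-- Pre_ excludes negative nof_irreleveant_symobls, on which A raises TypeError
-- (range(2**n) with a fractional 2**n) and B raises ValueError (negative shift count),
-- and nof_irreleveant_symobls ≥ 63, on which A's list(range(2**n)) unconditionally
-- raises OverflowError (length exceeds C ssize_t) and B's range-extend raises likewise.
def Pre_get_extended_minterms (minterms : List Int) (nof_irreleveant_symobls : Int) : Prop :=
  0 ≤ nof_irreleveant_symobls ∧ nof_irreleveant_symobls < 63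
instance (minterms : List Int) (nof_irreleveant_symobls : Int) : Decidable (Pre_get_extended_minterms minterms nof_irreleveant_symobls) := by unfold Pre_get_extended_minterms; infer_instance
def pvWitness_get_extended_minterms : List Int × Int := ([1, 5, 13], 2)

def Spec_get_extended_minterms (minterms : List Int) (nof_irreleveant_symobls : Int) (out : List Int) : Prop := out = get_extended_minterms_alt minterms nof_irreleveant_symobls
instance (minterms : List Int) (nof_irreleveant_symobls : Int) (out : List Int) : Decidable (Spec_get_extended_minterms minterms nof_irreleveant_symobls out) := by unfold Spec_get_extended_minterms; infer_instance

-- ===== CLAIM (what is proved, stated in full; the proofs are below) =====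
def Claim_equal_get_extended_minterms : Prop := ∀ (minterms : List Int) (nof_irreleveant_symobls : Int), Dom_get_extended_minterms minterms nof_irreleveant_symobls → Pre_get_extended_minterms minterms nof_irreleveant_symobls → Spec_get_extended_minterms minterms nof_irreleveant_symobls (get_extended_minterms minterms nof_irreleveant_symobls)

-- ===== LEMMAS AND PROOFS =====

/-- The mask `(m >> k) << k` is floor-division by `2^k` times `2^k`. -/
lemma mask_eq (m : Int) (k : Nat) : (m >>> k) <<< k = m / 2 ^ k * 2 ^ k := by
  rw [Int.shiftRight_eq_div_pow, Int.shiftLeft_eq]; push_cast; ring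

lemma mask_mono (a b : Int) (k : Nat) (h : a ≤ b) : (a >>> k) <<< k ≤ (b >>> k) <<< k := by
  rw [mask_eq, mask_eq]
  have := Int.ediv_le_ediv (c := (2 : Int) ^ k) (pow_pos (by norm_num) k) h
  nlinarith [this, pow_pos (show (0 : Int) < 2 by norm_num) k]

lemma mask_dvd (m : Int) (k : Nat) : (2 : Int) ^ k ∣ (m >>> k) <<< k := by
  rw [mask_eq]; exact Dvd.intro_left _ rfl

/-- Membership in A's extended-minterm set built by folding `Set.update`. -/
lemma mem_foldl_update (l : List Int) (g : Int → List Int) (s : PySem.Set Int) (y : Int) :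
    y ∈ l.foldl (fun s msb => PySem.Set.update s (g msb)) s ↔ y ∈ s ∨ ∃ b ∈ l, y ∈ g b := by
  induction l generalizing s with
  | nil => simp
  | cons a t ih =>
    simp only [List.foldl_cons, ih, PySem.Set.mem_update, List.mem_cons]
    constructor
    · rintro ((h | h) | ⟨b, hb, hy⟩)
      · exact Or.inl h
      · exact Or.inr ⟨a, Or.inl rfl, h⟩
      · exact Or.inr ⟨b, Or.inr hb, hy⟩
    · rintro (h | ⟨b, (rfl | hb), hy⟩)
      · exact Or.inl (Or.inl h)
      · exact Or.inl (Or.inr hy)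
      · exact Or.inr ⟨b, hb, hy⟩

/-- The fold of `Set.update`s keeps the set duplicate-free. -/
lemma nodup_foldl_update (l : List Int) (g : Int → List Int) (s : PySem.Set Int)
    (hs : s.Nodup) : (l.foldl (fun s msb => PySem.Set.update s (g msb)) s).Nodup := by
  induction l generalizing s with
  | nil => exact hs
  | cons a t ih => exact ih _ (PySem.Set.nodup_update s (g a) hs)

/-- Invariant of B's scan state: `acc` is the strictly increasing concatenation of all
blocks emitted so far, `L` the last emitted base. -/
def ScanInv (k : Nat) (ms acc : List Int) (L : Option Int) : Prop :=
  match L with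
  | none => acc = []
  | some l => (2 : Int) ^ k ∣ l ∧ (∀ m ∈ ms, l ≤ (m >>> k) <<< k) ∧ acc.Pairwise (· < ·)
      ∧ (∀ x ∈ acc, x < l + 2 ^ k) ∧ (∀ x : Int, l ≤ x → x < l + 2 ^ k → x ∈ acc)

/-- B's scan over a nondecreasing list produces a strictly increasing list whose members
are exactly the old members plus the union of the blocks of the scanned minterms. -/
lemma fold_blocks (k : Nat) (ms : List Int) (acc : List Int) (L : Option Int)
    (hms : ms.Pairwise (· ≤ ·)) (hinv : ScanInv k ms acc L) :
    (ms.foldl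
      (fun (st : List Int × Option Int) (m : Int) =>
        if st.2 = some ((m >>> k) <<< k) then st
        else (st.1 ++ PySem.List.pyRange ((m >>> k) <<< k) ((m >>> k) <<< k + 2 ^ k) 1,
              some ((m >>> k) <<< k)))
      (acc, L)).1.Pairwise (· < ·) ∧
    ∀ x : Int, x ∈ (ms.foldl
      (fun (st : List Int × Option Int) (m : Int) =>
        if st.2 = some ((m >>> k) <<< k) then st
        else (st.1 ++ PySem.List.pyRange ((m >>> k) <<< k) ((m >>> k) <<< k + 2 ^ k) 1,
              some ((m >>> k) <<< k)))
      (acc, L)).1 ↔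
      x ∈ acc ∨ ∃ m ∈ ms, (m >>> k) <<< k ≤ x ∧ x < (m >>> k) <<< k + 2 ^ k := by
  induction ms generalizing acc L with
  | nil =>
    refine ⟨?_, by simp⟩
    cases L with
    | none =>
      have h : acc = [] := hinv
      simp [h]
    | some l => exact hinv.2.2.1
  | cons m t ih =>
    have hsize : (0 : Int) < 2 ^ k := pow_pos (by norm_num) k
    have hmt : ∀ m' ∈ t, m ≤ m' := fun m' hm' => (List.pairwise_cons.mp hms).1 m' hm'
    have hmstail : t.Pairwise (· ≤ ·) := (List.pairwise_cons.mp hms).2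
    simp only [List.foldl_cons]
    by_cases hL : L = some ((m >>> k) <<< k)
    · -- skipped: same base as last emitted
      rw [if_pos (by simpa using hL)]
      subst hL
      obtain ⟨hdvd, hall, hpw, hlt, hcov⟩ := hinv
      have hinv' : ScanInv k t acc (some ((m >>> k) <<< k)) :=
        ⟨hdvd, fun m' hm' => hall m' (List.mem_cons_of_mem _ hm'), hpw, hlt, hcov⟩
      obtain ⟨hp, hm⟩ := ih acc (some ((m >>> k) <<< k)) hmstail hinv'
      refine ⟨hp, fun x => ?_⟩
      rw [hm]
      constructor
      · rintro (h | ⟨b, hb, h1, h2⟩)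
        · exact Or.inl h
        · exact Or.inr ⟨b, List.mem_cons_of_mem _ hb, h1, h2⟩
      · rintro (h | ⟨b, hb, h1, h2⟩)
        · exact Or.inl h
        · rcases List.mem_cons.mp hb with rfl | hb
          · exact Or.inl (hcov x h1 h2)
          · exact Or.inr ⟨b, hb, h1, h2⟩
    · -- new base: emit its block
      rw [if_neg (by simpa using hL)]
      -- every element already in acc is below the new base
      have hacc_lt : ∀ x ∈ acc, x < (m >>> k) <<< k := by
        cases L with
        | none => intro x hx; rw [hinv] at hx; cases hx
        | some l =>
          obtain ⟨hdvd, hall, _, hlt, _⟩ := hinv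
          intro x hx
          have hlm : l ≤ (m >>> k) <<< k := hall m (List.mem_cons_self)
          have hne : l ≠ (m >>> k) <<< k := fun h => hL (by rw [h])
          have hdd : (2 : Int) ^ k ∣ (m >>> k) <<< k - l := Int.dvd_sub (mask_dvd m k) hdvd
          have : (2 : Int) ^ k ≤ (m >>> k) <<< k - l :=
            Int.le_of_dvd (by omega) hdd
          have := hlt x hx
          omega
      have hpw_acc : acc.Pairwise (· < ·) := by
        cases L with
        | none =>
          have h : acc = [] := hinv
          simp [h]
        | some l => exact hinv.2.2.1
      have hinv' : ScanInv k t
          (acc ++ PySem.List.pyRange ((m >>> k) <<< k) ((m >>> k) <<< k + 2 ^ k) 1)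
          (some ((m >>> k) <<< k)) := by
        refine ⟨mask_dvd m k, fun m' hm' => mask_mono m m' k (hmt m' hm'), ?_, ?_, ?_⟩
        · rw [List.pairwise_append]
          refine ⟨hpw_acc, PySem.List.pairwise_lt_pyRange_one _ _, ?_⟩
          intro x hx y hy
          have := (PySem.List.mem_pyRange_one).mp hy
          have := hacc_lt x hx
          omega
        · intro x hx
          rcases List.mem_append.mp hx with hx | hx
          · have := hacc_lt x hx; omega
          · have := (PySem.List.mem_pyRange_one).mp hx; omega
        · intro x h1 h2
          exact List.mem_append.mpr (Or.inr ((PySem.List.mem_pyRange_one).mpr ⟨h1, h2⟩))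
      obtain ⟨hp, hm⟩ := ih _ (some ((m >>> k) <<< k)) hmstail hinv'
      refine ⟨hp, fun x => ?_⟩
      rw [hm]
      simp only [List.mem_append, PySem.List.mem_pyRange_one, List.mem_cons]
      constructor
      · rintro ((h | ⟨h1, h2⟩) | ⟨b, hb, h1, h2⟩)
        · exact Or.inl h
        · exact Or.inr ⟨m, Or.inl rfl, h1, h2⟩
        · exact Or.inr ⟨b, Or.inr hb, h1, h2⟩
      · rintro (h | ⟨b, (rfl | hb), h1, h2⟩)
        · exact Or.inl (Or.inl h)
        · exact Or.inl (Or.inr ⟨h1, h2⟩)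
        · exact Or.inr ⟨b, hb, h1, h2⟩

-- ===== VERDICT (by name: the statement is the Claim_ definition above) =====
theorem get_extended_minterms_spec : Claim_equal_get_extended_minterms := by
  intro minterms nof hdom hpre
  unfold Spec_get_extended_minterms get_extended_minterms get_extended_minterms_alt
  set k := nof.toNat with hk
  -- B's result, via the scan lemma
  have hms : (PySem.List.sorted minterms (fun x => x) false).Pairwise (· ≤ ·) := by
    have := PySem.List.sorted_pairwise minterms (fun x => x)
    simpa using this
  obtain ⟨hpairB, hmemB⟩ := fold_blocks k (PySem.List.sorted minterms (fun x => x) false)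
      [] none hms (by simp [ScanInv])
  simp only
  -- identify B's fold with the lemma's fold (the let-bound base/size zeta-reduce away)
  apply PySem.List.sorted_eq_of_perm_of_pairwise_lt _ _ _ ?_ hpairB
  -- permutation: both lists are nodup with the same members
  have hnodB : ((PySem.List.sorted minterms (fun x => x) false).foldl
      (fun (st : List Int × Option Int) (m : Int) =>
        if st.2 = some ((m >>> k) <<< k) then st
        else (st.1 ++ PySem.List.pyRange ((m >>> k) <<< k) ((m >>> k) <<< k + 2 ^ k) 1,
              some ((m >>> k) <<< k)))
      ([], none)).1.Nodup := hpairB.imp ne_of_lt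
  have hnodA : ((PySem.Set.ofList (minterms.map (fun m : Int => (m >>> k) <<< k))).foldl
      (fun s msb => PySem.Set.update s
        ((PySem.List.pyRange 0 ((2 : Int) ^ k) 1).map (fun lsb => msb + lsb)))
      PySem.Set.empty).Nodup :=
    nodup_foldl_update _ _ _ List.nodup_nil
  rw [List.perm_ext_iff_of_nodup hnodB hnodA]
  intro x
  rw [hmemB x, mem_foldl_update]
  simp only [PySem.Set.empty, List.not_mem_nil, false_or, List.mem_map,
    PySem.List.mem_sorted, PySem.Set.mem_ofList, PySem.List.mem_pyRange_one]
  constructor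
  · rintro ⟨m, hm, h1, h2⟩
    exact ⟨(m >>> k) <<< k, ⟨m, hm, rfl⟩, x - (m >>> k) <<< k, ⟨by omega, by omega⟩, by omega⟩
  · rintro ⟨b, ⟨m, hm, rfl⟩, l, ⟨hl0, hl1⟩, rfl⟩
    exact ⟨m, hm, by omega, by omega⟩
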